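-- pv_equiv track=rewrite | github.com/PortPy-Project/PortPy | portpy/photon/cvxpy_prob.py | matching_keys
-- ===== SOURCE A (Python) =====
-- def matching_keys(dictionary, search_string):
--     get_key = None
--     for key, val in dictionary.items():
--         if search_string in key:
--             get_key = key
--     if get_key is not None:
--         return get_key
--     else:
--         return ''
-- ===== SOURCE B (Python) =====
-- def matching_keys(dictionary, search_string):
--     for key in reversed(dictionary):
--         if search_string in key:
--             return key
--     return ''
-- ===== Notes on version B (the rewrite author's own statement) =====
-- stated objective: simpler
-- what changed: Replaces the full forward scan that overwrites a running last-match variable with a reverse scan over the keys that returns at the first hit.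
import Mathlib
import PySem

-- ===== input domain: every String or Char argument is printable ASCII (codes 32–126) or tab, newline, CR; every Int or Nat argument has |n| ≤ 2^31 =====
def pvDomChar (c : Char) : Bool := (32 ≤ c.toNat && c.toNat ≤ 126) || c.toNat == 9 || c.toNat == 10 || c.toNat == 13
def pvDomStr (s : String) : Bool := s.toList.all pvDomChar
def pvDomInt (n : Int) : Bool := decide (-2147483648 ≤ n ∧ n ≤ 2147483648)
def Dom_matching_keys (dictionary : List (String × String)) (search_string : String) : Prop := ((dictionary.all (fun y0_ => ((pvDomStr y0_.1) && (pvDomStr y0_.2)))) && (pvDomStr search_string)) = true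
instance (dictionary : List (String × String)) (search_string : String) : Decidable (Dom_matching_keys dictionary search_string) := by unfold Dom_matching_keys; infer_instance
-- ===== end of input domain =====

-- B replaces A's forward scan (overwriting a running last-match variable) with a reverse scan that returns the first hit: simpler, same result.


-- ===== PORT A =====
-- Forward scan: overwrite get_key with every key containing search_string; '' if none.
def matching_keys (dictionary : List (String × String)) (search_string : String) : String :=
  let get_key : Option String :=
    dictionary.foldl (fun acc kv => if PySem.Str.isIn search_string kv.1 then some kv.1 else acc) none
  match get_key with
  | some k => k
  | none => ""

-- ===== PORT B =====
-- Reverse scan: return the first key (from the back) containing search_string; '' if none.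
def matching_keys_alt_go (l : List (String × String)) (search_string : String) : String :=
  match l with
  | [] => ""
  | kv :: rest => if PySem.Str.isIn search_string kv.1 then kv.1 else matching_keys_alt_go rest search_string

def matching_keys_alt (dictionary : List (String × String)) (search_string : String) : String :=
  matching_keys_alt_go dictionary.reverse search_string

-- ===== PRECONDITION & SPEC =====
def Spec_matching_keys (dictionary : List (String × String)) (search_string : String) (out : String) : Prop := out = matching_keys_alt dictionary search_string
instance (dictionary : List (String × String)) (search_string : String) (out : String) : Decidable (Spec_matching_keys dictionary search_string out) := by unfold Spec_matching_keys; infer_instance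

-- ===== CLAIM (what is proved, stated in full; the proofs are below) =====
def Claim_equal_matching_keys : Prop := ∀ (dictionary : List (String × String)) (search_string : String), Dom_matching_keys dictionary search_string → Spec_matching_keys dictionary search_string (matching_keys dictionary search_string)

-- ===== LEMMAS AND PROOFS =====

lemma matching_keys_fold_eq (ss : String) :
    ∀ (d : List (String × String)) (acc : Option String),
      d.foldl (fun acc kv => if PySem.Str.isIn ss kv.1 then some kv.1 else acc) acc =
        match d.reverse.find? (fun kv => PySem.Str.isIn ss kv.1) with
        | some kv => some kv.1
        | none => acc := by
  intro d
  induction d with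
  | nil => intro acc; rfl
  | cons kv rest ih =>
    intro acc
    simp only [List.foldl_cons, ih, List.reverse_cons, List.find?_append]
    cases h : rest.reverse.find? (fun kv => PySem.Str.isIn ss kv.1) with
    | some _ => rfl
    | none =>
      simp only [Option.none_or,
        show List.find? (fun kv => PySem.Str.isIn ss kv.1) [kv] =
            (match PySem.Str.isIn ss kv.1 with | true => some kv | false => none) from rfl]
      cases PySem.Str.isIn ss kv.1 <;> rfl

lemma matching_keys_alt_go_eq (ss : String) :
    ∀ (l : List (String × String)),
      matching_keys_alt_go l ss =
        match l.find? (fun kv => PySem.Str.isIn ss kv.1) with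
        | some kv => kv.1
        | none => "" := by
  intro l
  induction l with
  | nil => rfl
  | cons kv rest ih =>
    simp only [matching_keys_alt_go, ih,
      show List.find? (fun kv => PySem.Str.isIn ss kv.1) (kv :: rest) =
          (match PySem.Str.isIn ss kv.1 with
           | true => some kv
           | false => List.find? (fun kv => PySem.Str.isIn ss kv.1) rest) from rfl]
    cases PySem.Str.isIn ss kv.1 <;> rfl

-- ===== VERDICT (by name: the statement is the Claim_ definition above) =====
theorem matching_keys_spec : Claim_equal_matching_keys := by
  intro d ss _
  unfold Spec_matching_keys matching_keys matching_keys_alt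
  rw [matching_keys_fold_eq, matching_keys_alt_go_eq]
  cases d.reverse.find? (fun kv => PySem.Str.isIn ss kv.1) <;> rfl
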